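-- pv_equiv track=rewrite | github.com/tjsry0466/algorithm-study | programmers/광물 캐기.py | solution
-- ===== SOURCE A (Python) =====
-- def solution(picks, minerals):
--     def calculate_fatigue(group, pick_type):
--         if pick_type == "diamond":
--             return sum(group)
--         elif pick_type == "iron":
--             return group[0] * 5 + group[1] * 1 + group[2] * 1
--         elif pick_type == "stone":
--             return group[0] * 25 + group[1] * 5 + group[2] * 1
--
--     # 1. minerals를 5개씩 그룹화
--     max_minerals = sum(picks) * 5
--     minerals = minerals[:max_minerals]
--     groups = []
--
--     for i in range(0, len(minerals), 5):
--         group = minerals[i : i + 5]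
--         diamond = group.count("diamond")
--         iron = group.count("iron")
--         stone = group.count("stone")
--         groups.append([diamond, iron, stone])
--
--     # 2. 그룹별로 다이아, 철, 돌의 개수를 기준으로 정렬
--     groups.sort(key=lambda x: (-x[0], -x[1], -x[2]))
--
--     # 3. 정렬된 그룹에 대해 다이아, 철, 돌 순서로 피로도 계산
--     answer = 0
--     pick_types = ["diamond", "iron", "stone"]
--     for group in groups:
--         for pick_type, count in zip(pick_types, picks):
--             if count > 0:
--                 answer += calculate_fatigue(group, pick_type)
--                 picks[pick_types.index(pick_type)] -= 1
--                 break
--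
--     return answer
-- ===== SOURCE B (Python) =====
-- def solution(picks, minerals):
--     # Counting-sort alternative: no comparison sort. Bucket each 5-chunk by its
--     # (diamond, iron, stone) signature (each component is at most 5), then walk all
--     # possible signatures in descending lexicographic order, assigning the remaining
--     # picks to whole buckets at a time with block arithmetic (k groups * cost).
--     # Mutates `picks` in place exactly as A does (same final state).
--     ms = minerals[:sum(picks) * 5]
--     buckets = {}
--     for i in range(0, len(ms), 5):
--         d = it = st = 0
--         for m in ms[i:i + 5]:
--             if m == "diamond":
--                 d += 1
--             elif m == "iron":
--                 it += 1
--             elif m == "stone":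
--                 st += 1
--         key = (d, it, st)
--         buckets[key] = buckets.get(key, 0) + 1
--
--     total = 0
--     for d in range(5, -1, -1):
--         for it in range(5 - d, -1, -1):
--             for st in range(5 - d - it, -1, -1):
--                 c = buckets.get((d, it, st), 0)
--                 if c == 0:
--                     continue
--                 costs = (d + it + st, 5 * d + it + st, 25 * d + 5 * it + st)
--                 for j in range(min(3, len(picks))):
--                     if c == 0:
--                         break
--                     if picks[j] > 0:
--                         k = min(picks[j], c)
--                         total += k * costs[j]
--                         picks[j] -= k
--                         c -= k
--     return total
-- ===== Notes on version B (the rewrite author's own statement) =====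
-- stated objective: alternative
-- what changed: B replaces A's comparison sort plus per-group greedy scan with a counting-sort scheme: it buckets each 5-chunk by its bounded (diamond,iron,stone) signature in a dict, enumerates all possible signatures in descending lexicographic order, and consumes picks in whole blocks per bucket (k groups times cost) instead of one group at a time.
import Mathlib
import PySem

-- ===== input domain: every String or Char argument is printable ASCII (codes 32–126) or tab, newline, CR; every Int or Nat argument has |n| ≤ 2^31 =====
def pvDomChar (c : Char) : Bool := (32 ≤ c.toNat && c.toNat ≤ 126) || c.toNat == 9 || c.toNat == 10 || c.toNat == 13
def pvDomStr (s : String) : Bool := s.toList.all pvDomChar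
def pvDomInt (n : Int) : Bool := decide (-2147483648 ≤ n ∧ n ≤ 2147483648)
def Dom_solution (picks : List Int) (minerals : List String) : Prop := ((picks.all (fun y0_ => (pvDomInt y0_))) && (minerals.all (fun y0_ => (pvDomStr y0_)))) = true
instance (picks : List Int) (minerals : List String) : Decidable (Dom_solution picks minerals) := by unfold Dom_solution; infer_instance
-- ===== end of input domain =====

-- B replaces A's comparison sort + per-group greedy scan by a counting scheme: buckets
-- keyed by each chunk's bounded (diamond,iron,stone) signature, walked in descending
-- lexicographic order with block consumption of the picks. Equivalence is about the
-- RETURN value (in Python both leave `picks` in the same final state).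

-- ===== PORT A =====

-- A's calculate_fatigue. `group` is always the 3-element count list A builds, so the
-- index accesses are in range (`.getD 0` never fires) and the trailing else (where
-- Python would return None) is unreachable for A's three callers.
def pvCalcFatigue (group : List Int) (pickType : String) : Int :=
  if pickType == "diamond" then group.sum
  else if pickType == "iron" then
    PySem.List.pyGetD group 0 0 * 5 + PySem.List.pyGetD group 1 0 * 1 + PySem.List.pyGetD group 2 0 * 1
  else if pickType == "stone" then
    PySem.List.pyGetD group 0 0 * 25 + PySem.List.pyGetD group 1 0 * 5 + PySem.List.pyGetD group 2 0 * 1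
  else 0

def pvPickTypes : List String := ["diamond", "iron", "stone"]

-- A's inner `for pick_type, count in zip(...): if count > 0: ...; break` — the first
-- pick type whose remaining count is positive.
def pvFirstPick : List (String × Int) → Option String
  | [] => none
  | (pt, c) :: rest => if c > 0 then some pt else pvFirstPick rest

-- one iteration of A's outer loop, state = (answer, picks); `pick_types.index(pt)`
-- always succeeds (pt comes from pick_types), so `.getD 0` never fires, and the index
-- is < picks.length (pt was zipped with a picks entry), so pyGetD's default never fires.
def pvAStep (st : Int × List Int) (group : List Int) : Int × List Int :=
  match pvFirstPick (pvPickTypes.zip st.2) with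
  | some pt =>
    let j := (PySem.List.index? pvPickTypes pt).getD 0
    (st.1 + pvCalcFatigue group pt, st.2.set j (PySem.List.pyGetD st.2 (j : Int) 0 - 1))
  | none => st

-- the body of A's grouping loop: the [diamond, iron, stone] count list of chunk ms[i:i+5]
def pvGroupOf (ms : List String) (i : Int) : List Int :=
  let group := PySem.List.slice ms (some i) (some (i + 5))
  [(PySem.List.count group "diamond" : Int),
   (PySem.List.count group "iron" : Int),
   (PySem.List.count group "stone" : Int)]

def solution (picks : List Int) (minerals : List String) : Int :=
  let maxMinerals := picks.sum * 5
  let ms := PySem.List.slice minerals none (some maxMinerals)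
  let groups := (PySem.List.pyRange 0 ms.length 5).foldl
    (fun gs i => gs ++ [pvGroupOf ms i]) []
  -- groups.sort(key=lambda x: (-x[0], -x[1], -x[2])): Python's single STABLE sort on the
  -- 3-tuple key is ported exactly as a stable sort on the last key followed by a stable
  -- sorted2 on the first two keys (radix decomposition of a stable lexicographic sort);
  -- every x is a 3-element list, so pyGetD's default never fires
  let sortedGroups := PySem.List.sorted2
    (PySem.List.sorted groups (fun x => -(PySem.List.pyGetD x 2 0)) false)
    (fun x => -(PySem.List.pyGetD x 0 0)) (fun x => -(PySem.List.pyGetD x 1 0)) false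
  (sortedGroups.foldl pvAStep (0, picks)).1

-- ===== PORT B =====

-- B's per-chunk classification loop: state = the running (d, it, st) counters
def pvSigStep (s : Int × Int × Int) (m : String) : Int × Int × Int :=
  if m == "diamond" then (s.1 + 1, s.2.1, s.2.2)
  else if m == "iron" then (s.1, s.2.1 + 1, s.2.2)
  else if m == "stone" then (s.1, s.2.1, s.2.2 + 1)
  else s

def pvSig (group : List String) : Int × Int × Int := group.foldl pvSigStep (0, 0, 0)

-- the signature B computes for chunk ms[i:i+5] (Source B's `key`)
def pvSigOf (ms : List String) (i : Int) : Int × Int × Int :=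
  pvSig (PySem.List.slice ms (some i) (some (i + 5)))

-- B's inner `for j in range(min(3, len(picks)))` loop with its two early exits;
-- costs is B's 3-tuple, indexed like the Python tuple
def pvJLoop (costs : List Int) : List Int → Int → List Int → Int → Int × List Int
  | [], tot, ps, _ => (tot, ps)
  | j :: rest, tot, ps, c =>
    if c == 0 then (tot, ps)
    else if PySem.List.pyGetD ps j 0 > 0 then
      let k := min (PySem.List.pyGetD ps j 0) c
      pvJLoop costs rest (tot + k * PySem.List.pyGetD costs j 0)
        (ps.set j.toNat (PySem.List.pyGetD ps j 0 - k)) (c - k)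
    else pvJLoop costs rest tot ps c

-- the body of B's innermost loop for signature k, state = (total, picks)
def pvBucketStep (buckets : PySem.Dict (Int × Int × Int) Int) (st : Int × List Int)
    (k : Int × Int × Int) : Int × List Int :=
  let c := buckets.getD k 0
  if c == 0 then st
  else pvJLoop [k.1 + k.2.1 + k.2.2, 5 * k.1 + k.2.1 + k.2.2, 25 * k.1 + 5 * k.2.1 + k.2.2]
    (PySem.List.pyRange 0 (min 3 (st.2.length : Int)) 1) st.1 st.2 c

def solution_alt (picks : List Int) (minerals : List String) : Int :=
  let ms := PySem.List.slice minerals none (some (picks.sum * 5))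
  let buckets := (PySem.List.pyRange 0 ms.length 5).foldl
    (fun b i => b.insert (pvSigOf ms i) (b.getD (pvSigOf ms i) 0 + 1)) PySem.Dict.empty
  let res := (PySem.List.pyRange 5 (-1) (-1)).foldl (fun st d =>
    (PySem.List.pyRange (5 - d) (-1) (-1)).foldl (fun st it =>
      (PySem.List.pyRange (5 - d - it) (-1) (-1)).foldl (fun st s =>
        pvBucketStep buckets st (d, it, s)) st) st) (0, picks)
  res.1

-- ===== PRECONDITION & SPEC =====
def Spec_solution (picks : List Int) (minerals : List String) (out : Int) : Prop := out = solution_alt picks minerals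
instance (picks : List Int) (minerals : List String) (out : Int) : Decidable (Spec_solution picks minerals out) := by unfold Spec_solution; infer_instance

-- ===== CLAIM (what is proved, stated in full; the proofs are below) =====
def Claim_equal_solution : Prop := ∀ (picks : List Int) (minerals : List String), Dom_solution picks minerals → Spec_solution picks minerals (solution picks minerals)

-- ===== LEMMAS AND PROOFS =====

-- the comparator of A's second (stable) sorting pass, exactly as sorted2 builds it
def pvLt2 (a b : List Int) : Bool :=
  decide (-(PySem.List.pyGetD a 0 0) < -(PySem.List.pyGetD b 0 0)) ||
    (!decide (-(PySem.List.pyGetD b 0 0) < -(PySem.List.pyGetD a 0 0)) &&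
      decide (-(PySem.List.pyGetD a 1 0) < -(PySem.List.pyGetD b 1 0)))

-- "a's third count is at least b's" — the order A's first sorting pass established
def pvQ (a b : List Int) : Prop := PySem.List.pyGetD b 2 0 ≤ PySem.List.pyGetD a 2 0

-- invariant order of the second pass: strictly before under its comparator, or a
-- comparator tie with the first pass's order preserved (stability)
def pvR2 (a b : List Int) : Prop :=
  pvLt2 a b = true ∨ (pvLt2 a b = false ∧ pvLt2 b a = false ∧ pvQ a b)

def pvKt (x : List Int) : Int × Int × Int :=
  (PySem.List.pyGetD x 0 0, PySem.List.pyGetD x 1 0, PySem.List.pyGetD x 2 0)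

def pvGOf (k : Int × Int × Int) : List Int := [k.1, k.2.1, k.2.2]

-- descending lexicographic (weak / strict) order on signatures
def pvGe3 (x y : Int × Int × Int) : Prop :=
  y.1 < x.1 ∨ (x.1 = y.1 ∧ (y.2.1 < x.2.1 ∨ (x.2.1 = y.2.1 ∧ y.2.2 ≤ x.2.2)))
def pvGt3 (x y : Int × Int × Int) : Prop :=
  y.1 < x.1 ∨ (x.1 = y.1 ∧ (y.2.1 < x.2.1 ∨ (x.2.1 = y.2.1 ∧ y.2.2 < x.2.2)))

-- all possible signatures, in descending lexicographic order (B's loop-nest order)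
def pvK : List (Int × Int × Int) :=
  (PySem.List.pyRange 5 (-1) (-1)).flatMap (fun d =>
    (PySem.List.pyRange (5 - d) (-1) (-1)).flatMap (fun it =>
      (PySem.List.pyRange (5 - d - it) (-1) (-1)).map (fun s => (d, it, s))))

def pvInB (k : Int × Int × Int) : Prop :=
  0 ≤ k.1 ∧ 0 ≤ k.2.1 ∧ 0 ≤ k.2.2 ∧ k.1 + k.2.1 + k.2.2 ≤ 5

-- the descending bucket expansion of a signature multiset
def pvFlat (sl : List (Int × Int × Int)) : List (List Int) :=
  pvK.flatMap (fun k => List.replicate (sl.count k) (pvGOf k))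

def pvCosts (k : Int × Int × Int) : List Int :=
  [k.1 + k.2.1 + k.2.2, 5 * k.1 + k.2.1 + k.2.2, 25 * k.1 + 5 * k.2.1 + k.2.2]

lemma pvLt2_trans_R2 (x y w : List Int) (h : pvLt2 x y = true) (h2 : pvR2 y w) :
    pvLt2 x w = true := by
  simp only [pvR2] at h2
  rcases h2 with h2 | ⟨h2a, h2b, h2c⟩ <;>
    (simp only [pvLt2, pvQ, Bool.or_eq_true, Bool.and_eq_true, Bool.not_eq_true', Bool.not_eq_false',
      decide_eq_true_eq, decide_eq_false_iff_not, Bool.or_eq_false_iff,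
      Bool.and_eq_false_iff] at * <;> omega)

lemma pvR2_of_not_lt (x y : List Int) (h : pvLt2 x y = false) (hq : pvQ y x) : pvR2 y x := by
  by_cases h' : pvLt2 y x = true
  · exact Or.inl h'
  · exact Or.inr ⟨Bool.eq_false_iff.mpr h', h, hq⟩

lemma pvR2_ge3 (a b : List Int) (h : pvR2 a b) : pvGe3 (pvKt a) (pvKt b) := by
  simp only [pvR2] at h
  rcases h with h | ⟨ha, hb, hc⟩ <;>
    (simp only [pvLt2, pvQ, pvGe3, pvKt, Bool.or_eq_true, Bool.and_eq_true, Bool.not_eq_true', Bool.not_eq_false',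
      decide_eq_true_eq, decide_eq_false_iff_not, Bool.or_eq_false_iff,
      Bool.and_eq_false_iff] at * <;> omega)

lemma pvInsertBy_pairwise (x : List Int) :
    ∀ acc : List (List Int), acc.Pairwise pvR2 → (∀ y ∈ acc, pvQ y x) →
      (PySem.List.insertBy pvLt2 x acc).Pairwise pvR2 := by
  intro acc
  induction acc with
  | nil => intro _ _; simp [PySem.List.insertBy]
  | cons y ys ih =>
    intro hpw hq
    rw [show PySem.List.insertBy pvLt2 x (y :: ys)
        = if pvLt2 x y then x :: y :: ys else y :: PySem.List.insertBy pvLt2 x ys from rfl]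
    by_cases hlt : pvLt2 x y = true
    · rw [if_pos hlt]
      refine List.Pairwise.cons ?_ hpw
      intro z hz
      rcases List.mem_cons.mp hz with rfl | hz'
      · exact Or.inl hlt
      · exact Or.inl (pvLt2_trans_R2 x y z hlt (List.rel_of_pairwise_cons hpw hz'))
    · rw [if_neg (by simpa using hlt)]
      refine List.Pairwise.cons ?_ (ih hpw.tail (fun z hz => hq z (List.mem_cons_of_mem y hz)))
      intro z hz
      rcases (PySem.List.mem_insertBy pvLt2 x z ys).mp hz with rfl | hz'
      · exact pvR2_of_not_lt z y (Bool.eq_false_iff.mpr hlt) (hq y (List.mem_cons_self))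
      · exact List.rel_of_pairwise_cons hpw hz'

lemma pvFoldl_insertBy_pairwise :
    ∀ (l acc : List (List Int)), l.Pairwise pvQ → acc.Pairwise pvR2 →
      (∀ y ∈ acc, ∀ x ∈ l, pvQ y x) →
      (l.foldl (fun acc x => PySem.List.insertBy pvLt2 x acc) acc).Pairwise pvR2 := by
  intro l
  induction l with
  | nil => intro acc _ h _; simpa using h
  | cons x t ih =>
    intro acc hl hacc hcross
    rw [List.foldl_cons]
    refine ih _ hl.tail (pvInsertBy_pairwise x acc hacc (fun y hy => hcross y hy x List.mem_cons_self)) ?_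
    intro y hy z hz
    rcases (PySem.List.mem_insertBy pvLt2 x y acc).mp hy with rfl | hy'
    · exact List.rel_of_pairwise_cons hl hz
    · exact hcross y hy' z (List.mem_cons_of_mem x hz)


lemma pvK_nodup : pvK.Nodup := by decide
lemma pvK_pairwise : pvK.Pairwise pvGt3 := by unfold pvGt3; decide
lemma pvMem_K (k : Int × Int × Int) (h : pvInB k) : k ∈ pvK := by
  obtain ⟨h1, h2, h3, h4⟩ := h
  obtain ⟨d, i, s⟩ := k
  simp only [] at h1 h2 h3 h4
  have hd : d ≤ 5 := by omega
  have hi : i ≤ 5 := by omega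
  have hs : s ≤ 5 := by omega
  interval_cases d <;> interval_cases i <;> interval_cases s <;> first | omega | decide
lemma pvGOf_inj : Function.Injective pvGOf := by
  rintro ⟨a, b, c⟩ ⟨d, e, f⟩ h
  simp [pvGOf] at h
  simp [Prod.ext_iff, h]

lemma pvCount_flatMap {α β : Type} [BEq β] [LawfulBEq β] (l : List α) (f : α → List β) (x : β) :
    (l.flatMap f).count x = (l.map (fun k => (f k).count x)).sum := by
  induction l with
  | nil => simp
  | cons a t ih => simp [List.flatMap_cons, List.count_append, ih]

lemma pvSum_single {α : Type} [DecidableEq α] (g : α → Nat) :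
    ∀ (K : List α) (k0 : α), K.Nodup → k0 ∈ K →
      (K.map (fun k => if k = k0 then g k else 0)).sum = g k0 := by
  intro K
  induction K with
  | nil => intro k0 _ h; simp at h
  | cons a t ih =>
    intro k0 hnd hmem
    rcases List.mem_cons.mp hmem with rfl | hmem'
    · simp only [List.map_cons, List.sum_cons, if_pos rfl]
      have : (t.map (fun k => if k = k0 then g k else 0)).sum = 0 := by
        apply List.sum_eq_zero
        intro y hy
        obtain ⟨z, hz, rfl⟩ := List.mem_map.mp hy
        have : z ≠ k0 := fun h => (List.nodup_cons.mp hnd).1 (h ▸ hz)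
        simp [this]
      simp [this]
    · have hne : a ≠ k0 := fun h => (List.nodup_cons.mp hnd).1 (h ▸ hmem')
      simp only [List.map_cons, List.sum_cons, if_neg hne]
      simpa using ih k0 (List.nodup_cons.mp hnd).2 hmem'

lemma pvFlat_perm (sl : List (Int × Int × Int)) (hb : ∀ k ∈ sl, pvInB k) :
    (pvFlat sl).Perm (sl.map pvGOf) := by
  rw [List.perm_iff_count]
  intro x
  rw [pvFlat, pvCount_flatMap]
  by_cases hx : ∃ k0, x = pvGOf k0 ∧ k0 ∈ sl
  · obtain ⟨k0, rfl, hk0⟩ := hx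
    rw [List.count_map_of_injective sl pvGOf pvGOf_inj k0]
    have hmem : k0 ∈ pvK := pvMem_K k0 (hb k0 hk0)
    have : (pvK.map (fun k => (List.replicate (sl.count k) (pvGOf k)).count (pvGOf k0))).sum
        = (pvK.map (fun k => if k = k0 then sl.count k else 0)).sum := by
      congr 1
      apply List.map_congr_left
      intro k _
      rw [List.count_replicate]
      by_cases hk : k = k0
      · simp [hk]
      · have : ¬ (pvGOf k == pvGOf k0) = true := by
          simp only [beq_iff_eq]
          exact fun h => hk (pvGOf_inj h)
        simp [this, hk]
    rw [this, pvSum_single (fun k => sl.count k) pvK k0 pvK_nodup hmem]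
  · have hr : (sl.map pvGOf).count x = 0 := by
      rw [List.count_eq_zero]
      intro hmem
      obtain ⟨z, hz, rfl⟩ := List.mem_map.mp hmem
      exact hx ⟨z, rfl, hz⟩
    rw [hr]
    apply List.sum_eq_zero
    intro y hy
    obtain ⟨k, _, rfl⟩ := List.mem_map.mp hy
    rw [List.count_replicate]
    by_cases hk : (pvGOf k == x) = true
    · simp only [hk, if_pos rfl]
      by_cases hc : sl.count k = 0
      · exact hc
      · exact absurd ⟨k, (beq_iff_eq.mp hk).symm, List.count_pos_iff.mp (Nat.pos_of_ne_zero hc)⟩ hx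
    · simp [hk]

lemma pvKt_gOf (k : Int × Int × Int) : pvKt (pvGOf k) = k := by
  simp [pvKt, pvGOf, PySem.List.pyGetD, PySem.List.pyGet?, PySem.List.pyIdx?]

lemma pvGt3_ge3 (x y : Int × Int × Int) (h : pvGt3 x y) : pvGe3 x y := by
  unfold pvGt3 at h; unfold pvGe3; omega

lemma pvFlat_pairwise (sl : List (Int × Int × Int)) :
    (pvFlat sl).Pairwise (fun a b => pvGe3 (pvKt a) (pvKt b)) := by
  rw [pvFlat, List.pairwise_flatMap]
  constructor
  · intro k _
    apply List.pairwise_replicate.mpr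
    right
    rw [pvKt_gOf]
    unfold pvGe3; omega
  · apply pvK_pairwise.imp_of_mem
    intro k1 k2 _ _ hgt x hx y hy
    rw [List.eq_of_mem_replicate hx, List.eq_of_mem_replicate hy, pvKt_gOf, pvKt_gOf]
    exact pvGt3_ge3 _ _ hgt

lemma pvSort_eq (sl : List (Int × Int × Int)) (hb : ∀ k ∈ sl, pvInB k) :
    PySem.List.sorted2
      (PySem.List.sorted (sl.map pvGOf) (fun x => -(PySem.List.pyGetD x 2 0)) false)
      (fun x => -(PySem.List.pyGetD x 0 0)) (fun x => -(PySem.List.pyGetD x 1 0)) false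
      = pvFlat sl := by
  set L1 := PySem.List.sorted (sl.map pvGOf) (fun x => -(PySem.List.pyGetD x 2 0)) false with hL1
  have hfold : PySem.List.sorted2 L1
      (fun x => -(PySem.List.pyGetD x 0 0)) (fun x => -(PySem.List.pyGetD x 1 0)) false
      = L1.foldl (fun acc x => PySem.List.insertBy pvLt2 x acc) [] := rfl
  have hQ : L1.Pairwise pvQ := by
    have := PySem.List.sorted_pairwise (sl.map pvGOf) (fun x => -(PySem.List.pyGetD x 2 0))
    exact this.imp (fun {a b} h => by unfold pvQ; omega)
  have hR2 : (PySem.List.sorted2 L1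
      (fun x => -(PySem.List.pyGetD x 0 0)) (fun x => -(PySem.List.pyGetD x 1 0)) false).Pairwise pvR2 := by
    rw [hfold]
    exact pvFoldl_insertBy_pairwise L1 [] hQ (List.Pairwise.nil) (by simp)
  have hperm1 : (PySem.List.sorted2 L1
      (fun x => -(PySem.List.pyGetD x 0 0)) (fun x => -(PySem.List.pyGetD x 1 0)) false).Perm (sl.map pvGOf) :=
    (PySem.List.sorted2_perm L1 _ _ false).trans (PySem.List.sorted_perm _ _ _)
  have hperm : (PySem.List.sorted2 L1
      (fun x => -(PySem.List.pyGetD x 0 0)) (fun x => -(PySem.List.pyGetD x 1 0)) false).Perm (pvFlat sl) :=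
    hperm1.trans (pvFlat_perm sl hb).symm
  refine List.eq_of_perm_of_sorted ?_ (hR2.imp (fun {a b} h => pvR2_ge3 a b h)) (pvFlat_pairwise sl) hperm
  · intro a b ha hb' hab hba
    have haM : a ∈ sl.map pvGOf := hperm1.subset ha
    obtain ⟨ka, _, rfl⟩ := List.mem_map.mp haM
    have hbM : b ∈ pvFlat sl := hb'
    obtain ⟨kb, _, hbrep⟩ := List.mem_flatMap.mp hbM
    have hbeq : b = pvGOf kb := List.eq_of_mem_replicate hbrep
    subst hbeq
    rw [pvKt_gOf, pvKt_gOf] at hab hba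
    have : ka = kb := by
      obtain ⟨a1, a2, a3⟩ := ka
      obtain ⟨b1, b2, b3⟩ := kb
      unfold pvGe3 at hab hba
      simp only [Prod.ext_iff]
      simp only [] at hab hba
      omega
    rw [this]


lemma pvJLoop_zero (cs js : List Int) (tot : Int) (ps : List Int) :
    pvJLoop cs js tot ps 0 = (tot, ps) := by
  cases js <;> simp [pvJLoop]

lemma pvJLoop_cons (cs : List Int) (j : Int) (rest : List Int) (tot : Int) (ps : List Int) (c : Int) :
    pvJLoop cs (j :: rest) tot ps c
      = if c == 0 then (tot, ps)
        else if PySem.List.pyGetD ps j 0 > 0 then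
          pvJLoop cs rest (tot + min (PySem.List.pyGetD ps j 0) c * PySem.List.pyGetD cs j 0)
            (ps.set j.toNat (PySem.List.pyGetD ps j 0 - min (PySem.List.pyGetD ps j 0) c)) (c - min (PySem.List.pyGetD ps j 0) c)
        else pvJLoop cs rest tot ps c := rfl

lemma pyGetD_cons0 (p0 : Int) (r : List Int) : PySem.List.pyGetD (p0 :: r) 0 0 = p0 := by
  simp [PySem.List.pyGetD, PySem.List.pyGet?, PySem.List.pyIdx?]
lemma pyGetD_cons1 (p0 p1 : Int) (r : List Int) : PySem.List.pyGetD (p0 :: p1 :: r) 1 0 = p1 := by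
  simp [PySem.List.pyGetD, PySem.List.pyGet?, PySem.List.pyIdx?]
lemma pyGetD_cons2 (p0 p1 p2 : Int) (r : List Int) : PySem.List.pyGetD (p0 :: p1 :: p2 :: r) 2 0 = p2 := by
  simp [PySem.List.pyGetD, PySem.List.pyGet?, PySem.List.pyIdx?]
  rw [if_pos (by omega)]
  simp

lemma pvJskip (cs : List Int) (j : Int) (rest : List Int) (tot : Int) (ps : List Int) (c : Int)
    (hc : c ≠ 0) (h : ¬ 0 < PySem.List.pyGetD ps j 0) :
    pvJLoop cs (j :: rest) tot ps c = pvJLoop cs rest tot ps c := by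
  rw [pvJLoop_cons, if_neg (by simp [hc]), if_neg h]

lemma pvJsplit0 (cs rest : List Int) (a p0 : Int) (t : List Int) (c : Int)
    (h0 : 0 < p0) (hc : 0 < c) :
    pvJLoop cs (0 :: rest) a (p0 :: t) c
      = pvJLoop cs (0 :: rest) (a + PySem.List.pyGetD cs 0 0) ((p0 - 1) :: t) (c - 1) := by
  conv_lhs => rw [pvJLoop_cons]
  conv_rhs => rw [pvJLoop_cons]
  simp only [pyGetD_cons0, Int.toNat_zero, List.set_cons_zero]
  rw [if_neg (by simp; omega), if_pos h0]
  by_cases hc1 : c = 1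
  · subst hc1
    rw [if_pos (by simp)]
    simp only [show min p0 (1 : Int) = 1 from by omega]
    simp [pvJLoop_zero]
  · rw [if_neg (by simp; omega)]
    by_cases h0' : (0 : Int) < p0 - 1
    · rw [if_pos h0']
      have hk : min p0 c = min (p0 - 1) (c - 1) + 1 := by omega
      simp only [hk]
      have e1 : a + (min (p0 - 1) (c - 1) + 1) * PySem.List.pyGetD cs 0 0
          = a + PySem.List.pyGetD cs 0 0 + min (p0 - 1) (c - 1) * PySem.List.pyGetD cs 0 0 := by ring
      have e2 : p0 - (min (p0 - 1) (c - 1) + 1) = p0 - 1 - min (p0 - 1) (c - 1) := by ring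
      have e3 : c - (min (p0 - 1) (c - 1) + 1) = c - 1 - min (p0 - 1) (c - 1) := by ring
      rw [e1, e2, e3]
    · rw [if_neg h0']
      simp only [show min p0 c = 1 from by omega, show p0 - 1 = 0 from by omega]
      simp

lemma pvJsplit1 (cs rest : List Int) (a p0 p1 : Int) (t : List Int) (c : Int)
    (h1 : 0 < p1) (hc : 0 < c) :
    pvJLoop cs (1 :: rest) a (p0 :: p1 :: t) c
      = pvJLoop cs (1 :: rest) (a + PySem.List.pyGetD cs 1 0) (p0 :: (p1 - 1) :: t) (c - 1) := by
  conv_lhs => rw [pvJLoop_cons]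
  conv_rhs => rw [pvJLoop_cons]
  simp only [pyGetD_cons1, Int.toNat_one, List.set_cons_succ, List.set_cons_zero]
  rw [if_neg (by simp; omega), if_pos h1]
  by_cases hc1 : c = 1
  · subst hc1
    rw [if_pos (by simp)]
    simp only [show min p1 (1 : Int) = 1 from by omega]
    simp [pvJLoop_zero]
  · rw [if_neg (by simp; omega)]
    by_cases h1' : (0 : Int) < p1 - 1
    · rw [if_pos h1']
      have hk : min p1 c = min (p1 - 1) (c - 1) + 1 := by omega
      simp only [hk]
      have e1 : a + (min (p1 - 1) (c - 1) + 1) * PySem.List.pyGetD cs 1 0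
          = a + PySem.List.pyGetD cs 1 0 + min (p1 - 1) (c - 1) * PySem.List.pyGetD cs 1 0 := by ring
      have e2 : p1 - (min (p1 - 1) (c - 1) + 1) = p1 - 1 - min (p1 - 1) (c - 1) := by ring
      have e3 : c - (min (p1 - 1) (c - 1) + 1) = c - 1 - min (p1 - 1) (c - 1) := by ring
      rw [e1, e2, e3]
    · rw [if_neg h1']
      simp only [show min p1 c = 1 from by omega, show p1 - 1 = 0 from by omega]
      simp

lemma pvJsplit2 (cs rest : List Int) (a p0 p1 p2 : Int) (t : List Int) (c : Int)
    (h2 : 0 < p2) (hc : 0 < c) :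
    pvJLoop cs (2 :: rest) a (p0 :: p1 :: p2 :: t) c
      = pvJLoop cs (2 :: rest) (a + PySem.List.pyGetD cs 2 0) (p0 :: p1 :: (p2 - 1) :: t) (c - 1) := by
  conv_lhs => rw [pvJLoop_cons]
  conv_rhs => rw [pvJLoop_cons]
  simp only [pyGetD_cons2, show ((2 : Int)).toNat = 2 from rfl, List.set_cons_succ, List.set_cons_zero]
  rw [if_neg (by simp; omega), if_pos h2]
  by_cases hc1 : c = 1
  · subst hc1
    rw [if_pos (by simp)]
    simp only [show min p2 (1 : Int) = 1 from by omega]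
    simp [pvJLoop_zero]
  · rw [if_neg (by simp; omega)]
    by_cases h2' : (0 : Int) < p2 - 1
    · rw [if_pos h2']
      have hk : min p2 c = min (p2 - 1) (c - 1) + 1 := by omega
      simp only [hk]
      have e1 : a + (min (p2 - 1) (c - 1) + 1) * PySem.List.pyGetD cs 2 0
          = a + PySem.List.pyGetD cs 2 0 + min (p2 - 1) (c - 1) * PySem.List.pyGetD cs 2 0 := by ring
      have e2 : p2 - (min (p2 - 1) (c - 1) + 1) = p2 - 1 - min (p2 - 1) (c - 1) := by ring
      have e3 : c - (min (p2 - 1) (c - 1) + 1) = c - 1 - min (p2 - 1) (c - 1) := by ring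
      rw [e1, e2, e3]
    · rw [if_neg h2']
      simp only [show min p2 c = 1 from by omega, show p2 - 1 = 0 from by omega]
      simp

lemma pvFat_d (k : Int × Int × Int) :
    pvCalcFatigue (pvGOf k) "diamond" = PySem.List.pyGetD (pvCosts k) 0 0 := by
  simp [pvCalcFatigue, pvGOf, pvCosts, pyGetD_cons0]
  ring

lemma pvFat_i (k : Int × Int × Int) :
    pvCalcFatigue (pvGOf k) "iron" = PySem.List.pyGetD (pvCosts k) 1 0 := by
  simp [pvCalcFatigue, pvGOf, pvCosts, pyGetD_cons1, pyGetD_cons2]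
  ring

lemma pvFat_s (k : Int × Int × Int) :
    pvCalcFatigue (pvGOf k) "stone" = PySem.List.pyGetD (pvCosts k) 2 0 := by
  simp [pvCalcFatigue, pvGOf, pvCosts, pyGetD_cons1, pyGetD_cons2]
  ring

lemma pvAStep_nil (a : Int) (g : List Int) : pvAStep (a, []) g = (a, []) := by
  simp [pvAStep, pvPickTypes, pvFirstPick]

lemma pvAStep_d (a p0 : Int) (t : List Int) (g : List Int) (h0 : 0 < p0) :
    pvAStep (a, p0 :: t) g = (a + pvCalcFatigue g "diamond", (p0 - 1) :: t) := by
  have hd : (List.idxOf? "diamond" ["diamond", "iron", "stone"]).getD 0 = 0 := rfl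
  simp [pvAStep, pvPickTypes, pvFirstPick, h0, hd, PySem.List.index?, pyGetD_cons0]

lemma pvAStep_i (a p0 p1 : Int) (t : List Int) (g : List Int) (h0 : ¬ 0 < p0) (h1 : 0 < p1) :
    pvAStep (a, p0 :: p1 :: t) g = (a + pvCalcFatigue g "iron", p0 :: (p1 - 1) :: t) := by
  have hi : (List.idxOf? "iron" ["diamond", "iron", "stone"]).getD 0 = 1 := rfl
  simp [pvAStep, pvPickTypes, pvFirstPick, h0, h1, hi, PySem.List.index?, pyGetD_cons1]

lemma pvAStep_s (a p0 p1 p2 : Int) (t : List Int) (g : List Int)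
    (h0 : ¬ 0 < p0) (h1 : ¬ 0 < p1) (h2 : 0 < p2) :
    pvAStep (a, p0 :: p1 :: p2 :: t) g = (a + pvCalcFatigue g "stone", p0 :: p1 :: (p2 - 1) :: t) := by
  have hs : (List.idxOf? "stone" ["diamond", "iron", "stone"]).getD 0 = 2 := rfl
  simp [pvAStep, pvPickTypes, pvFirstPick, h0, h1, h2, hs, PySem.List.index?, pyGetD_cons2]

lemma pvAStep_noop1 (a p0 : Int) (g : List Int) (h0 : ¬ 0 < p0) :
    pvAStep (a, [p0]) g = (a, [p0]) := by
  simp [pvAStep, pvPickTypes, pvFirstPick, h0]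

lemma pvAStep_noop2 (a p0 p1 : Int) (g : List Int) (h0 : ¬ 0 < p0) (h1 : ¬ 0 < p1) :
    pvAStep (a, [p0, p1]) g = (a, [p0, p1]) := by
  simp [pvAStep, pvPickTypes, pvFirstPick, h0, h1]

lemma pvAStep_noop3 (a p0 p1 p2 : Int) (t : List Int) (g : List Int)
    (h0 : ¬ 0 < p0) (h1 : ¬ 0 < p1) (h2 : ¬ 0 < p2) :
    pvAStep (a, p0 :: p1 :: p2 :: t) g = (a, p0 :: p1 :: p2 :: t) := by
  simp [pvAStep, pvPickTypes, pvFirstPick, h0, h1, h2]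

lemma pvRep_noop (g : List Int) (st : Int × List Int) (hstep : pvAStep st g = st) :
    ∀ n : Nat, (List.replicate n g).foldl pvAStep st = st := by
  intro n
  induction n with
  | zero => rfl
  | succ n ih => rw [List.replicate_succ, List.foldl_cons, hstep, ih]

lemma pvBlock3 (k : Int × Int × Int) : ∀ (n : Nat) (a p0 p1 p2 : Int) (r : List Int),
    (List.replicate n (pvGOf k)).foldl pvAStep (a, p0 :: p1 :: p2 :: r)
      = if ((n : Int)) == 0 then (a, p0 :: p1 :: p2 :: r)
        else pvJLoop (pvCosts k) [0, 1, 2] a (p0 :: p1 :: p2 :: r) (n : Int) := by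
  intro n
  induction n with
  | zero => intro a p0 p1 p2 r; simp
  | succ n ih =>
    intro a p0 p1 p2 r
    rw [List.replicate_succ, List.foldl_cons, if_neg (by simp; omega)]
    by_cases h0 : 0 < p0
    · rw [pvAStep_d _ _ _ _ h0, pvFat_d, ih,
        pvJsplit0 (pvCosts k) [1, 2] a p0 (p1 :: p2 :: r) ((n + 1 : Nat) : Int) h0 (by omega),
        show ((n + 1 : Nat) : Int) - 1 = (n : Int) from by push_cast; ring]
      by_cases hn : n = 0
      · subst hn
        rw [if_pos (by simp), Nat.cast_zero, pvJLoop_zero]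
      · rw [if_neg (by simpa using hn)]
    · by_cases h1 : 0 < p1
      · rw [pvAStep_i _ _ _ _ _ h0 h1, pvFat_i, ih,
          pvJskip (pvCosts k) 0 [1, 2] a (p0 :: p1 :: p2 :: r) ((n + 1 : Nat) : Int)
            (by omega) (by simpa [pyGetD_cons0] using h0),
          pvJsplit1 (pvCosts k) [2] a p0 p1 (p2 :: r) ((n + 1 : Nat) : Int) h1 (by omega),
          show ((n + 1 : Nat) : Int) - 1 = (n : Int) from by push_cast; ring]
        by_cases hn : n = 0
        · subst hn
          rw [if_pos (by simp), Nat.cast_zero, pvJLoop_zero]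
        · rw [if_neg (by simpa using hn),
            pvJskip (pvCosts k) 0 [1, 2] (a + PySem.List.pyGetD (pvCosts k) 1 0)
              (p0 :: (p1 - 1) :: p2 :: r) ((n : Nat) : Int)
              (by omega) (by simpa [pyGetD_cons0] using h0)]
      · by_cases h2 : 0 < p2
        · rw [pvAStep_s _ _ _ _ _ _ h0 h1 h2, pvFat_s, ih,
            pvJskip (pvCosts k) 0 [1, 2] a (p0 :: p1 :: p2 :: r) ((n + 1 : Nat) : Int)
              (by omega) (by simpa [pyGetD_cons0] using h0),
            pvJskip (pvCosts k) 1 [2] a (p0 :: p1 :: p2 :: r) ((n + 1 : Nat) : Int)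
              (by omega) (by simpa [pyGetD_cons1] using h1),
            pvJsplit2 (pvCosts k) [] a p0 p1 p2 r ((n + 1 : Nat) : Int) h2 (by omega),
            show ((n + 1 : Nat) : Int) - 1 = (n : Int) from by push_cast; ring]
          by_cases hn : n = 0
          · subst hn
            rw [if_pos (by simp), Nat.cast_zero, pvJLoop_zero]
          · rw [if_neg (by simpa using hn),
              pvJskip (pvCosts k) 0 [1, 2] (a + PySem.List.pyGetD (pvCosts k) 2 0)
                (p0 :: p1 :: (p2 - 1) :: r) ((n : Nat) : Int)
                (by omega) (by simpa [pyGetD_cons0] using h0),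
              pvJskip (pvCosts k) 1 [2] (a + PySem.List.pyGetD (pvCosts k) 2 0)
                (p0 :: p1 :: (p2 - 1) :: r) ((n : Nat) : Int)
                (by omega) (by simpa [pyGetD_cons1] using h1)]
        · rw [pvAStep_noop3 _ _ _ _ _ _ h0 h1 h2,
            pvRep_noop _ _ (pvAStep_noop3 a p0 p1 p2 r (pvGOf k) h0 h1 h2) n,
            pvJskip (pvCosts k) 0 [1, 2] a (p0 :: p1 :: p2 :: r) ((n + 1 : Nat) : Int)
              (by omega) (by simpa [pyGetD_cons0] using h0),
            pvJskip (pvCosts k) 1 [2] a (p0 :: p1 :: p2 :: r) ((n + 1 : Nat) : Int)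
              (by omega) (by simpa [pyGetD_cons1] using h1),
            pvJskip (pvCosts k) 2 [] a (p0 :: p1 :: p2 :: r) ((n + 1 : Nat) : Int)
              (by omega) (by simpa [pyGetD_cons2] using h2)]
          rfl

lemma pvBlock0 (k : Int × Int × Int) (n : Nat) (a : Int) :
    (List.replicate n (pvGOf k)).foldl pvAStep (a, ([] : List Int))
      = if ((n : Int)) == 0 then (a, ([] : List Int))
        else pvJLoop (pvCosts k) [] a [] (n : Int) := by
  rw [pvRep_noop _ _ (pvAStep_nil a (pvGOf k)) n]
  split <;> rfl

lemma pvBlock1 (k : Int × Int × Int) : ∀ (n : Nat) (a p0 : Int),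
    (List.replicate n (pvGOf k)).foldl pvAStep (a, [p0])
      = if ((n : Int)) == 0 then (a, [p0])
        else pvJLoop (pvCosts k) [0] a [p0] (n : Int) := by
  intro n
  induction n with
  | zero => intro a p0; simp
  | succ n ih =>
    intro a p0
    rw [List.replicate_succ, List.foldl_cons, if_neg (by simp; omega)]
    by_cases h0 : 0 < p0
    · rw [pvAStep_d _ _ _ _ h0, pvFat_d, ih,
        pvJsplit0 (pvCosts k) [] a p0 [] ((n + 1 : Nat) : Int) h0 (by omega),
        show ((n + 1 : Nat) : Int) - 1 = (n : Int) from by push_cast; ring]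
      by_cases hn : n = 0
      · subst hn
        rw [if_pos (by simp), Nat.cast_zero, pvJLoop_zero]
      · rw [if_neg (by simpa using hn)]
    · rw [pvAStep_noop1 _ _ _ h0,
        pvRep_noop _ _ (pvAStep_noop1 a p0 (pvGOf k) h0) n,
        pvJskip (pvCosts k) 0 [] a [p0] ((n + 1 : Nat) : Int)
          (by omega) (by simpa [pyGetD_cons0] using h0)]
      rfl

lemma pvBlock2 (k : Int × Int × Int) : ∀ (n : Nat) (a p0 p1 : Int),
    (List.replicate n (pvGOf k)).foldl pvAStep (a, [p0, p1])
      = if ((n : Int)) == 0 then (a, [p0, p1])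
        else pvJLoop (pvCosts k) [0, 1] a [p0, p1] (n : Int) := by
  intro n
  induction n with
  | zero => intro a p0 p1; simp
  | succ n ih =>
    intro a p0 p1
    rw [List.replicate_succ, List.foldl_cons, if_neg (by simp; omega)]
    by_cases h0 : 0 < p0
    · rw [pvAStep_d _ _ _ _ h0, pvFat_d, ih,
        pvJsplit0 (pvCosts k) [1] a p0 [p1] ((n + 1 : Nat) : Int) h0 (by omega),
        show ((n + 1 : Nat) : Int) - 1 = (n : Int) from by push_cast; ring]
      by_cases hn : n = 0
      · subst hn
        rw [if_pos (by simp), Nat.cast_zero, pvJLoop_zero]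
      · rw [if_neg (by simpa using hn)]
    · by_cases h1 : 0 < p1
      · rw [pvAStep_i _ _ _ _ _ h0 h1, pvFat_i, ih,
          pvJskip (pvCosts k) 0 [1] a [p0, p1] ((n + 1 : Nat) : Int)
            (by omega) (by simpa [pyGetD_cons0] using h0),
          pvJsplit1 (pvCosts k) [] a p0 p1 [] ((n + 1 : Nat) : Int) h1 (by omega),
          show ((n + 1 : Nat) : Int) - 1 = (n : Int) from by push_cast; ring]
        by_cases hn : n = 0
        · subst hn
          rw [if_pos (by simp), Nat.cast_zero, pvJLoop_zero]
        · rw [if_neg (by simpa using hn),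
            pvJskip (pvCosts k) 0 [1] (a + PySem.List.pyGetD (pvCosts k) 1 0)
              [p0, p1 - 1] ((n : Nat) : Int)
              (by omega) (by simpa [pyGetD_cons0] using h0)]
      · rw [pvAStep_noop2 _ _ _ _ h0 h1,
          pvRep_noop _ _ (pvAStep_noop2 a p0 p1 (pvGOf k) h0 h1) n,
          pvJskip (pvCosts k) 0 [1] a [p0, p1] ((n + 1 : Nat) : Int)
            (by omega) (by simpa [pyGetD_cons0] using h0),
          pvJskip (pvCosts k) 1 [] a [p0, p1] ((n + 1 : Nat) : Int)
            (by omega) (by simpa [pyGetD_cons1] using h1)]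
        rfl

lemma pvBlock (k : Int × Int × Int) (n : Nat) (a : Int) (ps : List Int) :
    (List.replicate n (pvGOf k)).foldl pvAStep (a, ps)
      = if ((n : Int)) == 0 then (a, ps)
        else pvJLoop (pvCosts k) (PySem.List.pyRange 0 (min 3 (ps.length : Int)) 1) a ps (n : Int) := by
  match ps with
  | [] =>
    rw [show min 3 (((List.length ([] : List Int)) : Nat) : Int) = 0 from by simp,
      show PySem.List.pyRange 0 0 1 = [] from by decide]
    exact pvBlock0 k n a
  | [p0] =>
    rw [show min 3 (((List.length [p0]) : Nat) : Int) = 1 from by simp,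
      show PySem.List.pyRange 0 1 1 = [0] from by decide]
    exact pvBlock1 k n a p0
  | [p0, p1] =>
    rw [show min 3 (((List.length [p0, p1]) : Nat) : Int) = 2 from by simp,
      show PySem.List.pyRange 0 2 1 = [0, 1] from by decide]
    exact pvBlock2 k n a p0 p1
  | p0 :: p1 :: p2 :: r =>
    rw [show min 3 (((List.length (p0 :: p1 :: p2 :: r)) : Nat) : Int) = 3 from by simp; omega,
      show PySem.List.pyRange 0 3 1 = [0, 1, 2] from by decide]
    exact pvBlock3 k n a p0 p1 p2 r



lemma pvSig_go (l : List String) : ∀ a b c : Int,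
    l.foldl pvSigStep (a, b, c)
      = (a + (PySem.List.count l "diamond" : Int), b + (PySem.List.count l "iron" : Int),
         c + (PySem.List.count l "stone" : Int)) := by
  induction l with
  | nil => intro a b c; simp [PySem.List.count]
  | cons m t ih =>
    intro a b c
    rw [List.foldl_cons]
    by_cases h1 : m = "diamond"
    · subst h1
      rw [show pvSigStep (a, b, c) "diamond" = (a + 1, b, c) from by simp [pvSigStep], ih]
      simp [PySem.List.count, List.count_cons, Prod.ext_iff]
      omega
    · by_cases h2 : m = "iron"
      · subst h2
        rw [show pvSigStep (a, b, c) "iron" = (a, b + 1, c) from by simp [pvSigStep], ih]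
        simp [PySem.List.count, List.count_cons, Prod.ext_iff]
        omega
      · by_cases h3 : m = "stone"
        · subst h3
          rw [show pvSigStep (a, b, c) "stone" = (a, b, c + 1) from by simp [pvSigStep], ih]
          simp [PySem.List.count, List.count_cons, Prod.ext_iff]
          omega
        · rw [show pvSigStep (a, b, c) m = (a, b, c) from by simp [pvSigStep, h1, h2, h3], ih]
          simp [PySem.List.count, List.count_cons, h1, h2, h3]

lemma pvSig_eq (l : List String) :
    pvSig l = ((PySem.List.count l "diamond" : Int), (PySem.List.count l "iron" : Int),
      (PySem.List.count l "stone" : Int)) := by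
  unfold pvSig; rw [pvSig_go]; simp

lemma pvCount3_le (l : List String) :
    List.count "diamond" l + List.count "iron" l + List.count "stone" l ≤ l.length := by
  induction l with
  | nil => simp
  | cons m t ih =>
    simp only [List.count_cons, List.length_cons]
    split_ifs <;> simp_all <;> omega


lemma pvChunk_len (xs : List String) (i : Int) (hi : 0 ≤ i) :
    (PySem.List.slice xs (some i) (some (i + 5))).length ≤ 5 := by
  have : i = ((i.toNat : Nat) : Int) := by omega
  rw [this, show ((i.toNat : Nat) : Int) + 5 = ((i.toNat : Nat) : Int) + ((5 : Nat) : Int) from by norm_num,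
    PySem.List.slice_natCast_add]
  simpa using List.length_take_le _ _

lemma pvSig_inB (l : List String) (h : l.length ≤ 5) : pvInB (pvSig l) := by
  rw [pvSig_eq]
  have := pvCount3_le l
  refine ⟨by positivity, by positivity, by positivity, ?_⟩
  simp only [PySem.List.count]
  omega

lemma pvSigOf_inB (ms : List String) (i : Int) (hi : 0 ≤ i) : pvInB (pvSigOf ms i) :=
  pvSig_inB _ (pvChunk_len ms i hi)

-- A's chunk count-list is the expansion of B's chunk signature
lemma pvGroupOf_eq (ms : List String) (i : Int) : pvGroupOf ms i = pvGOf (pvSigOf ms i) := by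
  simp [pvGroupOf, pvSigOf, pvSig_eq, pvGOf]

-- A's grouping loop builds the pvGOf-image of B's signature list
lemma pvGroups_eq (ms : List String) :
    (PySem.List.pyRange 0 (ms.length : Int) 5).foldl (fun gs i => gs ++ [pvGroupOf ms i]) []
      = ((PySem.List.pyRange 0 (ms.length : Int) 5).map (pvSigOf ms)).map pvGOf := by
  rw [PySem.List.foldl_append_singleton_eq_map (pvGroupOf ms), List.map_map]
  simp only [List.nil_append]
  exact List.map_congr_left (fun i _ => pvGroupOf_eq ms i)

-- B's dict-building loop is the Counter of the signature list
lemma pvBuckets_eq (ms : List String) :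
    (PySem.List.pyRange 0 (ms.length : Int) 5).foldl
      (fun b i => b.insert (pvSigOf ms i) (b.getD (pvSigOf ms i) 0 + 1)) PySem.Dict.empty
      = PySem.Dict.counter ((PySem.List.pyRange 0 (ms.length : Int) 5).map (pvSigOf ms)) := by
  rw [← PySem.Dict.foldl_insert_getD_add_one_eq_counter, List.foldl_map]

-- greedy consumption of one whole bucket = B's bucket step, for Counter buckets
lemma pvBucket_eq (sl : List (Int × Int × Int)) (st : Int × List Int)
    (k : Int × Int × Int) :
    (List.replicate (sl.count k) (pvGOf k)).foldl pvAStep st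
      = pvBucketStep (PySem.Dict.counter sl) st k := by
  obtain ⟨a, ps⟩ := st
  rw [pvBlock k (sl.count k) a ps]
  rw [pvBucketStep]
  simp only [PySem.Dict.getD_counter]
  rfl

-- ===== VERDICT (by name: the statement is the Claim_ definition above) =====
set_option maxHeartbeats 2000000 in
theorem solution_spec : Claim_equal_solution := by
  intro picks minerals _
  unfold Spec_solution solution solution_alt
  dsimp only
  set ms := PySem.List.slice minerals none (some (picks.sum * 5)) with hms
  set sl := (PySem.List.pyRange 0 (ms.length : Int) 5).map (pvSigOf ms) with hsl
  have hb : ∀ k ∈ sl, pvInB k := by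
    intro k hk
    obtain ⟨i, hi, rfl⟩ := List.mem_map.mp hk
    have : 0 ≤ i := ((PySem.List.mem_pyRange_iff_of_pos (by norm_num) i).mp hi).1
    exact pvSigOf_inB ms i this
  rw [pvGroups_eq ms, pvSort_eq sl hb, pvBuckets_eq ms, ← hsl]
  rw [pvFlat, List.foldl_flatMap]
  rw [show pvK = (PySem.List.pyRange 5 (-1) (-1)).flatMap (fun d =>
    (PySem.List.pyRange (5 - d) (-1) (-1)).flatMap (fun it =>
      (PySem.List.pyRange (5 - d - it) (-1) (-1)).map (fun s => (d, it, s)))) from rfl,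
    List.foldl_flatMap]
  simp only [List.foldl_flatMap, List.foldl_map]
  congr 1
  apply PySem.List.foldl_congr_mem
  intro acc d _
  apply PySem.List.foldl_congr_mem
  intro acc2 it _
  apply PySem.List.foldl_congr_mem
  intro acc3 s _
  exact pvBucket_eq sl acc3 (d, it, s)
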